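-- pv_equiv track=rewrite | github.com/pypi-data/pypi-mirror-392 | packages/deptry-auto/deptry_auto-0.2.13.tar.gz/deptry_auto-0.2.13/src/deptry_auto/__init__.py | _filter_skipped_packages
-- ===== SOURCE A (Python) =====
-- from typing import Dict, Iterable, Iterator, List, Set, Tuple
--
-- _SKIPPED_PACKAGES = {
--     "machine",
--     "micropython",
--     "rp2",
--     "ucollections",
--     "ujson",
--     "uselect",
--     "ustruct",
--     "utime",
--     "neopixel",
-- }
--
-- def _filter_skipped_packages(packages: Iterable[str]) -> Tuple[Set[str], Set[str]]:
--     installable: Set[str] = set()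
--     skipped: Set[str] = set()
--     for package in packages:
--         if _is_skipped_package(package):
--             skipped.add(package)
--         else:
--             installable.add(package)
--     return installable, skipped
--
-- def _normalize_import_name(name: str) -> str:
--     return name.replace("-", "_")
--
-- def _normalized_key(name: str) -> str:
--     return _normalize_import_name(name).casefold()
--
-- def _is_skipped_package(package: str) -> bool:
--     return _normalized_key(package) in _SKIPPED_PACKAGES
-- ===== SOURCE B (Python) =====
-- _SKIPPED_PACKAGES = {
--     "machine",
--     "micropython",
--     "rp2",
--     "ucollections",
--     "ujson",
--     "uselect",
--     "ustruct",
--     "utime",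
--     "neopixel",
-- }
--
-- def _normalize_import_name(name: str) -> str:
--     return name.replace("-", "_")
--
-- def _normalized_key(name: str) -> str:
--     return _normalize_import_name(name).casefold()
--
-- def _is_skipped_package(package: str) -> bool:
--     return _normalized_key(package) in _SKIPPED_PACKAGES
--
-- def _filter_skipped_packages(packages):
--     # Divide and conquer: split in halves, partition each half recursively,
--     # merge the two partitions with set unions.
--     pkgs = list(packages)
--     if not pkgs:
--         return set(), set()
--     if len(pkgs) == 1:
--         p = pkgs[0]
--         if _is_skipped_package(p):
--             return set(), {p}
--         return {p}, set()
--     mid = len(pkgs) // 2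
--     left_inst, left_skip = _filter_skipped_packages(pkgs[:mid])
--     right_inst, right_skip = _filter_skipped_packages(pkgs[mid:])
--     return left_inst | right_inst, left_skip | right_skip
-- ===== Notes on version B (the rewrite author's own statement) =====
-- stated objective: alternative
-- what changed: B partitions by divide and conquer: it splits the list in halves, recursively partitions each half, and merges the two (installable, skipped) pairs with set unions, instead of A's single left-to-right pass accumulating into two sets element by element.
import Mathlib
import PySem

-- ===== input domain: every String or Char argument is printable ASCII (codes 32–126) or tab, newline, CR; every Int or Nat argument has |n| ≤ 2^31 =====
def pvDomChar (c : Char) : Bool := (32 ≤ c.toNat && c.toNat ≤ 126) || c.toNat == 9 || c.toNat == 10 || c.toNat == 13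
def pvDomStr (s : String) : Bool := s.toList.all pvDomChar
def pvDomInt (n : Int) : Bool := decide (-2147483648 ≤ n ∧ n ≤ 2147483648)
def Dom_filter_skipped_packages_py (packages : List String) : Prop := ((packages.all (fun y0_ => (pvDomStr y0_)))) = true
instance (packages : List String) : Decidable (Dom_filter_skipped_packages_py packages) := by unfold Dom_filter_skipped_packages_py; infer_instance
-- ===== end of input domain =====

-- B partitions by divide and conquer (split in halves, recurse, merge with set unions)
-- instead of A's single-pass two-branch accumulation; objective: alternative structure, same result.

-- ===== PORT A =====
def pvSkippedPackages : PySem.Set String :=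
  PySem.Set.ofList ["machine","micropython","rp2","ucollections","ujson","uselect","ustruct","utime","neopixel"]

-- casefold coincides with lower on the printable-ASCII domain
def pvNormalizedKey (name : String) : String := PySem.Str.lower (PySem.Str.replace name "-" "_")

def pvIsSkippedPackage (package : String) : Bool :=
  PySem.Set.contains pvSkippedPackages (pvNormalizedKey package)

def filter_skipped_packages_py (packages : List String) : List String × List String :=
  packages.foldl
    (fun acc package =>
      if pvIsSkippedPackage package then (acc.1, PySem.Set.add acc.2 package)
      else (PySem.Set.add acc.1 package, acc.2))
    (PySem.Set.empty, PySem.Set.empty)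

-- ===== PORT B =====
-- mid = len(pkgs) // 2: both operands are nonnegative, so Nat division is exact here
def filter_skipped_packages_py_alt (packages : List String) : List String × List String :=
  if packages.isEmpty then (PySem.Set.empty, PySem.Set.empty)
  else if packages.length == 1 then
    let p := (PySem.List.pyGet? packages 0).getD ""   -- pkgs[0]; in range since len = 1
    if pvIsSkippedPackage p then (PySem.Set.empty, PySem.Set.ofList [p])
    else (PySem.Set.ofList [p], PySem.Set.empty)
  else
    let mid : Nat := packages.length / 2
    let l := filter_skipped_packages_py_alt (PySem.List.slice packages none (some (mid : Int)))
    let r := filter_skipped_packages_py_alt (PySem.List.slice packages (some (mid : Int)) none)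
    (PySem.Set.union l.1 r.1, PySem.Set.union l.2 r.2)
termination_by packages.length
decreasing_by
  · rw [PySem.List.slice_to_natCast]
    rename_i h1 h2
    have e0 : packages.length ≠ 0 := by simpa [List.isEmpty_iff_length_eq_zero] using h1
    have e1 : packages.length ≠ 1 := by simpa using h2
    rw [List.length_take]
    omega
  · rw [PySem.List.slice_from_natCast]
    rename_i h1 h2
    have e0 : packages.length ≠ 0 := by simpa [List.isEmpty_iff_length_eq_zero] using h1
    have e1 : packages.length ≠ 1 := by simpa using h2
    rw [List.length_drop]
    omega

-- ===== PRECONDITION & SPEC =====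
def Spec_filter_skipped_packages_py (packages : List String) (out : List String × List String) : Prop := out = filter_skipped_packages_py_alt packages
instance (packages : List String) (out : List String × List String) : Decidable (Spec_filter_skipped_packages_py packages out) := by unfold Spec_filter_skipped_packages_py; infer_instance

-- ===== CLAIM =====
def Claim_equal_filter_skipped_packages_py : Prop := ∀ (packages : List String), Dom_filter_skipped_packages_py packages → Spec_filter_skipped_packages_py packages (filter_skipped_packages_py packages)

-- ===== LEMMAS AND PROOFS =====

-- A's two-branch loop splits into two filtered insert-folds
lemma loopA_split (l : List String) (i s : List String) :
    l.foldl
      (fun acc package =>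
        if pvIsSkippedPackage package then (acc.1, PySem.Set.add acc.2 package)
        else (PySem.Set.add acc.1 package, acc.2)) (i, s)
    = ((l.filter (fun p => !pvIsSkippedPackage p)).foldl PySem.Set.add i,
       (l.filter pvIsSkippedPackage).foldl PySem.Set.add s) := by
  induction l generalizing i s with
  | nil => rfl
  | cons x xs ih =>
    by_cases hx : pvIsSkippedPackage x <;> simp [List.foldl_cons, hx, ih]

-- left-biased set union of two built sets is the set of the concatenation
lemma ofList_append (a b : List String) :
    PySem.Set.ofList (a ++ b) = PySem.Set.union (PySem.Set.ofList a) (PySem.Set.ofList b) := by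
  rw [PySem.Set.ofList_append]
  show PySem.Set.update (PySem.Set.ofList a) b
      = PySem.Set.update (PySem.Set.ofList a) (PySem.Set.ofList b)
  rw [PySem.Set.update_eq_append_filter, PySem.Set.update_eq_append_filter,
    PySem.Set.ofList_ofList]

-- B computes exactly the two filtered sets
lemma altB_eq (packages : List String) :
    filter_skipped_packages_py_alt packages
      = (PySem.Set.ofList (packages.filter (fun p => !pvIsSkippedPackage p)),
         PySem.Set.ofList (packages.filter pvIsSkippedPackage)) := by
  rw [filter_skipped_packages_py_alt]
  by_cases h0 : packages.isEmpty
  · obtain rfl : packages = [] := by simpa [List.isEmpty_iff] using h0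
    simp [PySem.Set.ofList, PySem.Set.empty]
  · by_cases h1 : packages.length == 1
    · obtain ⟨p, rfl⟩ : ∃ p, packages = [p] := by
        have := List.length_eq_one_iff.mp (by simpa using h1)
        simpa using this
      by_cases hp : pvIsSkippedPackage p <;>
        simp [h0, hp, PySem.List.pyGet?, PySem.List.pyIdx?, PySem.Set.ofList,
          PySem.Set.empty, PySem.Set.add]
    · simp only [h0, h1, Bool.false_eq_true, if_false]
      rw [PySem.List.slice_to_natCast, PySem.List.slice_from_natCast]
      rw [altB_eq (packages.take (packages.length / 2)),
          altB_eq (packages.drop (packages.length / 2))]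
      have hq := List.filter_append (l₁ := packages.take (packages.length / 2))
        (l₂ := packages.drop (packages.length / 2)) (p := fun p => !pvIsSkippedPackage p)
      have hs := List.filter_append (l₁ := packages.take (packages.length / 2))
        (l₂ := packages.drop (packages.length / 2)) (p := pvIsSkippedPackage)
      rw [List.take_append_drop] at hq hs
      simp only [← ofList_append, ← hq, ← hs]
termination_by packages.length
decreasing_by
  ·
    have e0 : packages.length ≠ 0 := by simpa [List.isEmpty_iff_length_eq_zero] using h0
    have e1 : packages.length ≠ 1 := by simpa using h1
    rw [List.length_take]; omega
  ·
    have e0 : packages.length ≠ 0 := by simpa [List.isEmpty_iff_length_eq_zero] using h0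
    have e1 : packages.length ≠ 1 := by simpa using h1
    rw [List.length_drop]; omega

-- ===== VERDICT =====
theorem filter_skipped_packages_py_spec : Claim_equal_filter_skipped_packages_py := by
  intro packages _
  unfold Spec_filter_skipped_packages_py
  show filter_skipped_packages_py packages = filter_skipped_packages_py_alt packages
  rw [altB_eq]
  unfold filter_skipped_packages_py
  rw [loopA_split]
  rfl
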